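-- pv_equiv track=rewrite | github.com/pypi-data/pypi-mirror-73 | packages/QuickApp-z6/QuickApp-z6-6.0.4.tar.gz/QuickApp-z6-6.0.4/src/quickapp/app_utils/minimal_name.py | minimal_names_at_boundaries
-- ===== SOURCE A (Python) =====
-- from typing import List, Sequence, Tuple
--
-- def minimal_names_at_boundaries(objects: List[str], separators=['_', '-']) -> Tuple[str, List[str], str]:
--     """
--         Converts a list of object IDs to a minimal non-ambiguous list of names.
--
--         In this version, we only care about splitting at boundaries
--         defined by separators.
--
--         For example, the names: ::
--
--             test_learn1_fast_10
--             test_learn1_slow_10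
--             test_learn2_faster_10
--
--         is converted to: ::
--
--             learn1_fast
--             learn2_slow
--             learn2_faster
--
--         Returns prefix, minimal, postfix
--     """
--
--     if len(objects) == 1:
--         return '', objects, ''
--
--     s0 = separators[0]
--
--     # convert and split to uniform separators
--
--     def convert(x: str) -> str:
--         return x
--         # for s in separators[1:]:
--         #     x = x.replace(s, s0)
--         # return x
--
--     objectsu = list(map(convert, objects))
--     astokens = [x.split(s0) for x in objectsu]
--
--     def is_valid_prefix(p):
--         return all(x.startswith(p) for x in objectsu)
--
--     def is_valid_postfix(p):
--         return all(x.endswith(p) for x in objectsu)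
--
--     # max number of tokens
--     ntokens = max(list(map(len, astokens)))
--     prefix = None
--     for i in range(ntokens):
--         toks = astokens[0][:i]
--         p = "".join(t + s0 for t in toks)
--         if is_valid_prefix(p):
--             prefix = p
--         else:
--             break
--     assert prefix is not None
--
--     postfix = None
--     for i in range(ntokens):
--         t0 = astokens[0]
--         toks = t0[len(t0) - i:]
--         x = "".join(s0 + t for t in toks)
--         if is_valid_postfix(x):
--             postfix = x
--         else:
--             break
--
--     assert postfix is not None
--
--     n1 = len(prefix)
--     n2 = len(postfix)
--     # remove it
--     minimal = [o[n1:len(o) - n2] for o in objectsu]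
--
--     # recreate them to check everything is ok
--     objects2 = [prefix + m + postfix for m in minimal]
--
--     assert objects == objects2, (objects, objects2, (prefix, minimal, postfix))
--     return prefix, minimal, postfix
-- ===== SOURCE B (Python) =====
-- from typing import List, Tuple
--
--
-- def _cpl(a: str, b: str) -> int:
--     # length of the longest common prefix of a and b
--     n = min(len(a), len(b))
--     i = 0
--     while i < n and a[i] == b[i]:
--         i += 1
--     return i
--
--
-- def _csl(a: str, b: str) -> int:
--     # length of the longest common suffix of a and b
--     n = min(len(a), len(b))
--     j = 0
--     while j < n and a[len(a) - 1 - j] == b[len(b) - 1 - j]: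
--         j += 1
--     return j
--
--
-- def _trim_lengths(first: str, s0: str, objects: List[str]) -> Tuple[int, int]:
--     k = len(s0)
--     # positions just after each separator occurrence of first's split decomposition
--     cuts = []
--     c = 0
--     for t in first.split(s0)[:-1]:
--         c += len(t) + k
--         cuts.append(c)
--     # longest common prefix / suffix length of all objects with first (one pass)
--     L = len(first)
--     R = len(first)
--     for o in objects:
--         L = min(L, _cpl(first, o))
--         R = min(R, _csl(first, o))
--     # longest boundary prefix inside the common prefix, and
--     # longest boundary suffix (a suffix starting with s0) inside the common suffix
--     n1 = max((c for c in cuts if c <= L), default=0)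
--     n2 = max((len(first) - (c - k) for c in reversed(cuts)
--               if len(first) - (c - k) <= R), default=0)
--     return n1, n2
--
--
-- def minimal_names_at_boundaries(objects: List[str], separators=['_', '-']) -> Tuple[str, List[str], str]:
--     if len(objects) == 1:
--         return '', objects, ''
--     first = objects[0]
--     s0 = separators[0]
--     n1, n2 = _trim_lengths(first, s0, objects)
--     prefix = first[:n1]
--     postfix = first[len(first) - n2:]
--     minimal = [o[n1:len(o) - n2] for o in objects]
--     return prefix, minimal, postfix
-- ===== Notes on version B (the rewrite author's own statement) =====
-- stated objective: alternative
-- what changed: A joins candidate token prefixes/suffixes and re-checks every object with startswith/endswith for each candidate boundary; B computes the longest common prefix/suffix length of all objects in one pass and then takes the largest separator-boundary cut inside each, so no candidate strings are built and no per-candidate rescans happen.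
import Mathlib
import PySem

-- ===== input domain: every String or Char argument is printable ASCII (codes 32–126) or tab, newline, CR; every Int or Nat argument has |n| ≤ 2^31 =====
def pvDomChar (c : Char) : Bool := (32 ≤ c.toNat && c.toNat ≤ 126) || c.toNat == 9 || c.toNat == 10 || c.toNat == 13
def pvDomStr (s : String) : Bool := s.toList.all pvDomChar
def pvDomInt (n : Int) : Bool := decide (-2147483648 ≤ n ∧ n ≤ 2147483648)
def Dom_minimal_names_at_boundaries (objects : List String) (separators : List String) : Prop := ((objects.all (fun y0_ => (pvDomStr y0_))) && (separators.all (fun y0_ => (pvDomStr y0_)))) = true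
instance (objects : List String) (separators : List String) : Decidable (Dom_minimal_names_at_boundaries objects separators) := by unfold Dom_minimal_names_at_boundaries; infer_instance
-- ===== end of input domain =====

-- B replaces A's per-candidate rescans of all objects (startswith/endswith for every token boundary)
-- by one computation of the longest common prefix/suffix lengths and a max over boundary cuts inside them.


-- ===== PORT A =====
-- A's prefix loop: for i in range(ntokens): p = "".join(t+s0 for t in astokens[0][:i]);
--   if is_valid_prefix(p): prefix = p else: break
def pvAPrefixGo (objectsu : List (List Char)) (t0 : List (List Char)) (s0 : List Char) :
    Nat → Nat → Option (List Char) → Option (List Char)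
  | 0, _, pre => pre
  | fuel + 1, i, pre =>
    let p := ((t0.take i).map (fun t => t ++ s0)).flatten
    if objectsu.all (fun x => PySem.Chars.startswith x p) then
      pvAPrefixGo objectsu t0 s0 fuel (i + 1) (some p)
    else pre

-- A's postfix loop: for i in range(ntokens): toks = t0[len(t0)-i:]; x = "".join(s0+t for t in toks);
--   if is_valid_postfix(x): postfix = x else: break
def pvAPostfixGo (objectsu : List (List Char)) (t0 : List (List Char)) (s0 : List Char) :
    Nat → Nat → Option (List Char) → Option (List Char)
  | 0, _, post => post
  | fuel + 1, i, post =>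
    let toks := PySem.List.slice t0 (some ((t0.length : Int) - (i : Int))) none
    let x := (toks.map (fun t => s0 ++ t)).flatten
    if objectsu.all (fun o => PySem.Chars.endswith o x) then
      pvAPostfixGo objectsu t0 s0 fuel (i + 1) (some x)
    else post

def minimal_names_at_boundaries (objects : List String) (separators : List String) : String × List String × String :=
  if objects.length = 1 then ("", objects, "")
  else
    match objects, separators with
    | o0 :: rest, s0s :: _ =>
      let s0 := s0s.toList
      if s0 = [] then ("", [], "")       -- x.split(''): ValueError (outside Pre_)
      else
        let objectsu := (o0 :: rest).map String.toList     -- convert is the identity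
        let astokens := objectsu.map (fun x => PySem.Chars.splitOn x s0)
        let ntokens := (PySem.List.max? (astokens.map List.length) id).getD 0   -- max(...) of a nonempty list here
        let t0 := astokens.headD []                         -- astokens[0]
        let pre := (pvAPrefixGo objectsu t0 s0 ntokens 0 none).getD []    -- assert prefix is not None
        let post := (pvAPostfixGo objectsu t0 s0 ntokens 0 none).getD []  -- assert postfix is not None
        let n1 := pre.length
        let n2 := post.length
        let minimal := objectsu.map (fun o =>
          PySem.List.slice o (some (n1 : Int)) (some ((o.length : Int) - (n2 : Int))))
        let objects2 := minimal.map (fun m => pre ++ m ++ post)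
        if objectsu = objects2 then
          (String.ofList pre, minimal.map String.ofList, String.ofList post)
        else ("", [], "")                 -- assert objects == objects2 fails: AssertionError (outside Pre_)
    | _, _ => ("", [], "")                -- separators[0] (IndexError) / max([]) (ValueError) (outside Pre_)

-- ===== PORT B =====
-- _cpl: the index loop scanning the two strings from the left (ported as the structural recursion over the same characters)
def pvCpl (a b : List Char) : Nat :=
  match a with
  | [] => 0
  | x :: xs =>
    match b with
    | [] => 0
    | y :: ys => if x = y then pvCpl xs ys + 1 else 0

-- _csl: the same scan from the right end of both strings
def pvCsl (a b : List Char) : Nat := pvCpl a.reverse b.reverse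

-- cuts: c = 0; for t in first.split(s0)[:-1]: c += len(t) + k; cuts.append(c)
def pvCuts (toks : List (List Char)) (k : Nat) : List Nat :=
  ((toks.dropLast).foldl
    (fun (st : Nat × List Nat) t => (st.1 + t.length + k, st.2 ++ [st.1 + t.length + k]))
    (0, [])).2

-- _trim_lengths(first, s0, objects)
def pvTrimLens (f : List Char) (s0 : List Char) (objectsu : List (List Char)) : Nat × Nat :=
  let k := s0.length
  let cuts := pvCuts (PySem.Chars.splitOn f s0) k
  let L := objectsu.foldl (fun acc o => min acc (pvCpl f o)) f.length
  let R := objectsu.foldl (fun acc o => min acc (pvCsl f o)) f.length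
  let n1 := PySem.List.maxD (cuts.filter (fun c => c ≤ L)) id 0
  let n2 := PySem.List.maxD
      (((cuts.reverse).map (fun c => f.length - (c - k))).filter (fun d => d ≤ R)) id 0
  (n1, n2)

def minimal_names_at_boundaries_alt (objects : List String) (separators : List String) : String × List String × String :=
  if objects.length = 1 then ("", objects, "")
  else
    match objects with
    | [] => ("", [], "")                  -- objects[0]: IndexError (outside Pre_)
    | o0 :: rest =>
      match separators with
      | [] => ("", [], "")                -- separators[0]: IndexError (outside Pre_)
      | s0s :: _ =>
        let f := o0.toList
        let s0 := s0s.toList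
        if s0 = [] then ("", [], "")       -- first.split(''): ValueError (outside Pre_)
        else
          let objectsu := (o0 :: rest).map String.toList
          let t := pvTrimLens f s0 objectsu
          let n1 := t.1
          let n2 := t.2
          let minimal := objectsu.map (fun o =>
            PySem.List.slice o (some (n1 : Int)) (some ((o.length : Int) - (n2 : Int))))
          (String.ofList (f.take n1), minimal.map String.ofList, String.ofList (f.drop (f.length - n2)))

-- ===== PRECONDITION & SPEC =====
-- the length of the longest token-boundary prefix of f that every object starts with
def pvBoundaryPrefixLen (f sep : List Char) (objectsu : List (List Char)) : Nat :=
  PySem.List.maxD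
    ((pvCuts (PySem.Chars.splitOn f sep) sep.length).filter
      (fun c => objectsu.all (fun o => (f.take c).isPrefixOf o))) id 0

-- the length of the longest boundary suffix (starting with sep) that every object ends with
def pvBoundarySuffixLen (f sep : List Char) (objectsu : List (List Char)) : Nat :=
  PySem.List.maxD
    ((((pvCuts (PySem.Chars.splitOn f sep) sep.length).reverse).map
        (fun c => f.length - (c - sep.length))).filter
      (fun d => objectsu.all (fun o => (f.drop (f.length - d)).isSuffixOf o))) id 0

-- Pre_ excludes exactly the inputs on which A raises: empty objects (ValueError from max([])),
-- empty separators (IndexError), an empty first separator (ValueError from split('')), and inputs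
-- whose common boundary prefix and suffix overlap inside some object (A's own assert fails: AssertionError).
def Pre_minimal_names_at_boundaries (objects : List String) (separators : List String) : Prop :=
  objects.length = 1 ∨
  (objects ≠ [] ∧ separators ≠ [] ∧ (separators.headD "").toList ≠ [] ∧
    (∀ o ∈ objects,
      pvBoundaryPrefixLen (objects.headD "").toList (separators.headD "").toList
          (objects.map String.toList) +
        pvBoundarySuffixLen (objects.headD "").toList (separators.headD "").toList
          (objects.map String.toList) ≤ o.toList.length))
instance (objects : List String) (separators : List String) : Decidable (Pre_minimal_names_at_boundaries objects separators) := by unfold Pre_minimal_names_at_boundaries; infer_instance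

def pvWitness_minimal_names_at_boundaries : List String × List String :=
  (["test_learn1_fast_10", "test_learn1_slow_10", "test_learn2_faster_10"], ["_", "-"])

def Spec_minimal_names_at_boundaries (objects : List String) (separators : List String) (out : String × List String × String) : Prop := out = minimal_names_at_boundaries_alt objects separators
instance (objects : List String) (separators : List String) (out : String × List String × String) : Decidable (Spec_minimal_names_at_boundaries objects separators out) := by unfold Spec_minimal_names_at_boundaries; infer_instance

-- ===== CLAIM (what is proved, stated in full; the proofs are below) =====
def Claim_equal_minimal_names_at_boundaries : Prop := ∀ (objects : List String) (separators : List String), Dom_minimal_names_at_boundaries objects separators → Pre_minimal_names_at_boundaries objects separators → Spec_minimal_names_at_boundaries objects separators (minimal_names_at_boundaries objects separators)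

-- ===== LEMMAS AND PROOFS =====

def pvSplitF (s : Char) (ss : List Char) (pre l : List Char) : List (List Char) :=
  match l with
  | [] => [pre]
  | c :: rest =>
    if (s :: ss).isPrefixOf (c :: rest) then pre :: pvSplitF s ss [] (rest.drop ss.length)
    else pvSplitF s ss (pre ++ [c]) rest
termination_by l.length
decreasing_by
  · simp only [List.length_cons, List.length_drop]; omega
  · simp

theorem splitOn_go_eq (s : Char) (ss : List Char) :
    ∀ (fuel : Nat) (l cur : List Char) (acc : List (List Char)), l.length < fuel →
      PySem.Chars.splitOn.go (s :: ss) fuel l cur acc = acc.reverse ++ pvSplitF s ss cur.reverse l := by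
  intro fuel
  induction fuel with
  | zero => intro l cur acc h; omega
  | succ n ih =>
    intro l cur acc h
    match l with
    | [] => simp [PySem.Chars.splitOn.go, pvSplitF]
    | c :: rest =>
      rw [PySem.Chars.splitOn.go]
      by_cases hp : (s :: ss).isPrefixOf (c :: rest)
      · simp only [hp, if_true]
        rw [ih _ _ _ (by simp at h ⊢; omega)]
        simp [pvSplitF, hp]
      · simp only [hp, if_false]
        rw [ih rest (c :: cur) acc (by simp at h ⊢; omega)]
        conv_rhs => rw [pvSplitF]
        simp [hp]

theorem splitOn_eq (s : Char) (ss : List Char) (l : List Char) :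
    PySem.Chars.splitOn l (s :: ss) = pvSplitF s ss [] l := by
  rw [PySem.Chars.splitOn, splitOn_go_eq s ss _ _ _ _ (by omega)]
  simp

theorem pvSplitF_ne_nil (s : Char) (ss : List Char) (pre l : List Char) :
    pvSplitF s ss pre l ≠ [] := by
  fun_induction pvSplitF <;> simp_all

theorem intercalate_cons_of_ne_nil {sep x : List Char} {xs : List (List Char)} (h : xs ≠ []) :
    sep.intercalate (x :: xs) = x ++ sep ++ sep.intercalate xs := by
  match xs with
  | y :: ys => simp [List.intercalate, List.intersperse_cons₂]

theorem join_pvSplitF (s : Char) (ss : List Char) (pre l : List Char) :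
    (s :: ss).intercalate (pvSplitF s ss pre l) = pre ++ l := by
  fun_induction pvSplitF with
  | case1 pre => simp [List.intercalate]
  | case2 pre c rest hp ih =>
    rw [intercalate_cons_of_ne_nil (pvSplitF_ne_nil _ _ _ _), ih]
    have hpre : (s :: ss) <+: (c :: rest) := by
      simpa [List.isPrefixOf_iff_prefix] using hp
    obtain ⟨t, ht⟩ := hpre
    have hdrop : rest.drop ss.length = t := by
      have h2 := congrArg (List.drop (ss.length + 1)) ht
      simp at h2
      first | exact h2 | exact h2.symm
    simp [hdrop, ← ht]
  | case3 pre c rest hp ih =>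
    rw [ih]; simp

theorem join_splitOn (s : Char) (ss : List Char) (l : List Char) :
    (s :: ss).intercalate (PySem.Chars.splitOn l (s :: ss)) = l := by
  rw [splitOn_eq, join_pvSplitF]; simp

theorem splitOn_ne_nil (s : Char) (ss : List Char) (l : List Char) :
    PySem.Chars.splitOn l (s :: ss) ≠ [] := by
  rw [splitOn_eq]; exact pvSplitF_ne_nil _ _ _ _

-- ===== S2 =====
theorem flatten_take_intercalate (sep : List Char) :
    ∀ (toks : List (List Char)) (i : Nat), i < toks.length →
      ((toks.take i).map (fun t => t ++ sep)).flatten ++ sep.intercalate (toks.drop i) =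
        sep.intercalate toks := by
  intro toks
  induction toks with
  | nil => intro i h; simp at h
  | cons t ts ih =>
    intro i h
    match i with
    | 0 => simp
    | i + 1 =>
      have hts : ts ≠ [] := by
        intro he; subst he; simp at h
      rw [List.take_succ_cons, List.drop_succ_cons, List.map_cons, List.flatten_cons,
        intercalate_cons_of_ne_nil hts, List.append_assoc, ih i (by simpa using h)]

theorem flatten_all_right (sep : List Char) :
    ∀ (toks : List (List Char)), toks ≠ [] →
      (toks.map (fun t => t ++ sep)).flatten = sep.intercalate toks ++ sep := by
  intro toks
  induction toks with
  | nil => simp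
  | cons t ts ih =>
    intro _
    by_cases hts : ts = []
    · subst hts; simp [List.intercalate]
    · rw [List.map_cons, List.flatten_cons, ih hts, intercalate_cons_of_ne_nil hts]
      simp

theorem flatten_all_left (sep : List Char) :
    ∀ (toks : List (List Char)), toks ≠ [] →
      (toks.map (fun t => sep ++ t)).flatten = sep ++ sep.intercalate toks := by
  intro toks
  induction toks with
  | nil => simp
  | cons t ts ih =>
    intro _
    by_cases hts : ts = []
    · subst hts; simp [List.intercalate]
    · rw [List.map_cons, List.flatten_cons, ih hts, intercalate_cons_of_ne_nil hts]
      simp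

theorem intercalate_take_flatten (sep : List Char) :
    ∀ (toks : List (List Char)) (j : Nat), 1 ≤ j → j ≤ toks.length →
      sep.intercalate (toks.take j) ++ ((toks.drop j).map (fun t => sep ++ t)).flatten =
        sep.intercalate toks := by
  intro toks
  induction toks with
  | nil => intro j h1 h2; simp at h2; omega
  | cons t ts ih =>
    intro j h1 h2
    match j with
    | 0 => omega
    | 1 =>
      by_cases hts : ts = []
      · subst hts; simp [List.intercalate]
      · simp only [List.take_succ_cons, List.take_zero, List.drop_succ_cons, List.drop_zero]
        rw [flatten_all_left sep ts hts, intercalate_cons_of_ne_nil hts]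
        simp [List.intercalate]
    | (j + 2) =>
      have hts : ts.take (j+1) ≠ [] := by
        have : ts ≠ [] := by intro he; subst he; simp at h2
        simp [this]
      have hts' : ts ≠ [] := by intro he; subst he; simp at h2
      rw [List.take_succ_cons, List.drop_succ_cons, intercalate_cons_of_ne_nil hts,
        List.append_assoc, ih (j+1) (by omega) (by simpa using h2),
        intercalate_cons_of_ne_nil hts']

def pvSum (toks : List (List Char)) (k i : Nat) : Nat :=
  ((toks.take i).map (fun t => t.length + k)).sum

theorem pvSum_succ (toks : List (List Char)) (k i : Nat) (h : i < toks.length) :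
    pvSum toks k (i + 1) = pvSum toks k i + (toks[i].length + k) := by
  unfold pvSum
  rw [List.map_take, List.map_take,
    List.sum_take_succ (toks.map (fun t => t.length + k)) i (by simpa using h)]
  simp

theorem pvSum_lt (toks : List (List Char)) (k : Nat) (hk : 1 ≤ k) :
    ∀ i j : Nat, i < j → j ≤ toks.length → pvSum toks k i < pvSum toks k j := by
  intro i j hij hj
  induction j with
  | zero => omega
  | succ m ihm =>
    rw [pvSum_succ toks k m (by omega)]
    rcases Nat.lt_or_ge i m with h | h
    · have := ihm h (by omega); omega
    · have : i = m := by omega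
      subst this; omega

theorem pvSum_le_of_le (toks : List (List Char)) (k : Nat) (hk : 1 ≤ k) (i j : Nat)
    (hij : i ≤ j) (hj : j ≤ toks.length) : pvSum toks k i ≤ pvSum toks k j := by
  rcases Nat.lt_or_ge i j with h | h
  · exact (pvSum_lt toks k hk i j h hj).le
  · have : i = j := by omega
    subst this; omega

theorem pvCuts_fold (k : Nat) :
    ∀ (ts : List (List Char)) (c0 : Nat) (acc : List Nat),
      (ts.foldl (fun (st : Nat × List Nat) t => (st.1 + t.length + k, st.2 ++ [st.1 + t.length + k])) (c0, acc))
        = (c0 + (ts.map (fun t => t.length + k)).sum,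
           acc ++ (List.range ts.length).map (fun j => c0 + ((ts.take (j+1)).map (fun t => t.length + k)).sum)) := by
  intro ts
  induction ts with
  | nil => intro c0 acc; simp
  | cons t ts ih =>
    intro c0 acc
    rw [List.foldl_cons, ih]
    refine Prod.ext ?_ ?_
    · simp only [List.map_cons, List.sum_cons]; omega
    · simp only [List.length_cons, List.range_succ_eq_map, List.map_cons, List.map_map]
      rw [List.append_assoc]
      simp [List.map_map, List.take_succ_cons, Function.comp]
      refine ⟨by omega, fun a _ => by omega⟩

-- ===== S3: cuts =====
theorem pvCuts_eq (toks : List (List Char)) (k : Nat) :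
    pvCuts toks k = (List.range (toks.length - 1)).map (fun j => pvSum toks k (j + 1)) := by
  unfold pvCuts
  rw [pvCuts_fold]
  simp only [List.nil_append, List.length_dropLast]
  apply List.map_congr_left
  intro j hj
  rw [List.mem_range] at hj
  unfold pvSum
  rw [List.dropLast_eq_take, List.take_take]
  have hmin : min (j + 1) (toks.length - 1) = j + 1 := by omega
  rw [hmin]
  omega

theorem cuts_length (toks : List (List Char)) (k : Nat) :
    (pvCuts toks k).length = toks.length - 1 := by
  simp [pvCuts_eq]

theorem cuts_getElem (toks : List (List Char)) (k : Nat) (j : Nat) (hj : j < toks.length - 1) :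
    (pvCuts toks k)[j]'(by rw [cuts_length]; exact hj) = pvSum toks k (j + 1) := by
  simp [pvCuts_eq]

-- ===== S5: cpl / csl =====
theorem cpl_iff : ∀ (f o : List Char) (c : Nat), c ≤ f.length →
    ((f.take c) <+: o ↔ c ≤ pvCpl f o) := by
  intro f
  induction f with
  | nil =>
    intro o c hc
    simp at hc
    subst hc
    simp
  | cons a as ih =>
    intro o c hc
    match c with
    | 0 => simp
    | c + 1 =>
      match o with
      | [] => simp [pvCpl]
      | b :: bs =>
        by_cases hab : a = b
        · subst hab
          rw [List.take_succ_cons, List.cons_prefix_cons]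
          have hrec := ih bs c (by simpa using hc)
          simp only [pvCpl, eq_self_iff_true, if_true, true_and]
          rw [hrec]
          omega
        · simp [pvCpl, hab, List.cons_prefix_cons]

theorem pvCpl_nil_left (b : List Char) : pvCpl [] b = 0 := by
  cases b <;> rfl

theorem pvCpl_nil_right (a : List Char) : pvCpl a [] = 0 := by
  cases a <;> rfl

theorem cpl_take : ∀ (f o : List Char) (j : Nat), j ≤ pvCpl f o → f.take j = o.take j := by
  intro f
  induction f with
  | nil =>
    intro o j h
    rw [pvCpl_nil_left] at h
    have : j = 0 := by omega
    subst this
    simp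
  | cons a as ih =>
    intro o j h
    match o with
    | [] =>
      rw [pvCpl_nil_right] at h
      have : j = 0 := by omega
      subst this
      simp
    | b :: bs =>
      by_cases hab : a = b
      · subst hab
        simp only [pvCpl, eq_self_iff_true, if_true] at h
        match j with
        | 0 => simp
        | j + 1 =>
          simp only [List.take_succ_cons, List.cons.injEq, true_and]
          exact ih bs j (by omega)
      · simp [pvCpl, hab] at h
        subst h
        simp

theorem csl_iff (f o : List Char) (q : Nat) (hq : q ≤ f.length) :
    (f.drop (f.length - q) <:+ o) ↔ q ≤ pvCsl f o := by
  rw [← List.reverse_prefix, List.reverse_drop]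
  have : f.length - (f.length - q) = q := by omega
  rw [this]
  exact cpl_iff f.reverse o.reverse q (by simpa using hq)

theorem pvCpl_le_left : ∀ (a b : List Char), pvCpl a b ≤ a.length := by
  intro a
  induction a with
  | nil => intro b; simp [pvCpl]
  | cons x xs ih =>
    intro b
    match b with
    | [] => simp [pvCpl]
    | y :: ys =>
      by_cases h : x = y <;> simp [pvCpl, h]
      exact ih ys

theorem pvCpl_le_right : ∀ (a b : List Char), pvCpl a b ≤ b.length := by
  intro a
  induction a with
  | nil => intro b; simp [pvCpl]
  | cons x xs ih =>
    intro b
    match b with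
    | [] => simp [pvCpl]
    | y :: ys =>
      by_cases h : x = y <;> simp [pvCpl, h]
      exact ih ys

theorem csl_drop (f o : List Char) (q : Nat) (hq : q ≤ pvCsl f o) :
    f.drop (f.length - q) = o.drop (o.length - q) := by
  have hf : q ≤ f.length := le_trans hq (by simpa using pvCpl_le_left f.reverse o.reverse)
  have ho : q ≤ o.length := le_trans hq (by simpa using pvCpl_le_right f.reverse o.reverse)
  have h := cpl_take f.reverse o.reverse q hq
  have e1 : (f.drop (f.length - q)).reverse = f.reverse.take q := by
    rw [List.reverse_drop]; congr 1; omega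
  have e2 : (o.drop (o.length - q)).reverse = o.reverse.take q := by
    rw [List.reverse_drop]; congr 1; omega
  rw [← List.reverse_inj, e1, e2, h]

-- ===== foldl-min =====
theorem le_foldl_min {α : Type} (g : α → Nat) :
    ∀ (l : List α) (a c : Nat),
      (c ≤ l.foldl (fun acc x => min acc (g x)) a ↔ c ≤ a ∧ ∀ x ∈ l, c ≤ g x) := by
  intro l
  induction l with
  | nil => simp
  | cons x xs ih =>
    intro a c
    rw [List.foldl_cons, ih, le_min_iff, List.forall_mem_cons]
    tauto

-- ===== maxD =====
def pvStep : Option Nat → Nat → Option Nat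
  | none, x => some x
  | some m, x => if m < x then some x else some m

theorem max?_eq_foldl_pvStep (l : List Nat) :
    PySem.List.max? l id = l.foldl pvStep none := by
  unfold PySem.List.max? pvStep
  congr 1
  funext acc x
  match acc with
  | none => rfl
  | some m => rfl

theorem pvFoldMax_some :
    ∀ (xs : List Nat) (m : Nat), ∃ r, xs.foldl pvStep (some m) = some r := by
  intro xs
  induction xs with
  | nil => intro m; exact ⟨m, rfl⟩
  | cons x l ih =>
    intro m
    simp only [List.foldl_cons, pvStep]
    by_cases h : m < x
    · rw [if_pos h]; apply ih
    · rw [if_neg h]; apply ih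

theorem pvFoldMax_mem :
    ∀ (xs : List Nat) (m r : Nat), xs.foldl pvStep (some m) = some r → r = m ∨ r ∈ xs := by
  intro xs
  induction xs with
  | nil => intro m r h; simp at h; omega
  | cons x l ih =>
    intro m r h
    simp only [List.foldl_cons, pvStep] at h
    by_cases hx : m < x
    · rw [if_pos hx] at h
      rcases ih x r h with h' | h' <;> simp [h']
    · rw [if_neg hx] at h
      rcases ih m r h with h' | h' <;> simp [h']

theorem maxD_nil (d : Nat) : PySem.List.maxD ([] : List Nat) id d = d := rfl

theorem maxD_mem_or (l : List Nat) (d : Nat) :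
    PySem.List.maxD l id d = d ∨ PySem.List.maxD l id d ∈ l := by
  match l with
  | [] => left; rfl
  | x :: xs =>
    unfold PySem.List.maxD
    rw [max?_eq_foldl_pvStep]
    simp only [List.foldl_cons, pvStep]
    obtain ⟨r, hr⟩ := pvFoldMax_some xs x
    rw [hr]
    right
    rcases pvFoldMax_mem xs x r hr with h | h <;> simp [h]

theorem maxD_cons_mono (c : Nat) (l : List Nat) (d : Nat) (h : ∀ x ∈ l, c < x) :
    PySem.List.maxD (c :: l) id d = PySem.List.maxD l id c := by
  match l with
  | [] => rfl
  | x :: xs =>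
    unfold PySem.List.maxD
    rw [max?_eq_foldl_pvStep, max?_eq_foldl_pvStep]
    simp only [List.foldl_cons, pvStep]
    rw [if_pos (h x (by simp))]
    obtain ⟨r, hr⟩ := pvFoldMax_some xs x
    rw [hr]
    simp

-- ===== S6: candidates =====
theorem Jtake (sep : List Char) (toks : List (List Char)) (f : List Char)
    (hjoin : sep.intercalate toks = f) (i : Nat) (hi : i < toks.length) :
    ((toks.take i).map (fun t => t ++ sep)).flatten = f.take (pvSum toks sep.length i) ∧
      pvSum toks sep.length i ≤ f.length := by
  have h6 := flatten_take_intercalate sep toks i hi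
  rw [hjoin] at h6
  have hlen : (((toks.take i).map (fun t => t ++ sep)).flatten).length = pvSum toks sep.length i := by
    simp only [List.length_flatten, List.map_map, pvSum, List.map_take]
    congr 2
    apply List.map_congr_left
    intro t _
    simp
  constructor
  · rw [← h6, ← hlen, List.take_left]
  · rw [← h6, ← hlen]
    simp

theorem Jfull (sep : List Char) (toks : List (List Char)) (f : List Char)
    (hjoin : sep.intercalate toks = f) (hne : toks ≠ []) (i : Nat) (hi : toks.length ≤ i) :
    ((toks.take i).map (fun t => t ++ sep)).flatten = f ++ sep := by
  rw [List.take_of_length_le hi, flatten_all_right sep toks hne, hjoin]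

theorem Wdrop (sep : List Char) (toks : List (List Char)) (f : List Char)
    (hjoin : sep.intercalate toks = f) (j : Nat) (h1 : 1 ≤ j) (hj : j < toks.length) :
    ((toks.drop j).map (fun t => sep ++ t)).flatten =
        f.drop (pvSum toks sep.length j - sep.length) ∧
      sep.length ≤ pvSum toks sep.length j ∧
      pvSum toks sep.length j ≤ f.length := by
  have hne : toks ≠ [] := by intro he; subst he; simp at hj
  have htake : toks.take j ≠ [] := by
    simp [hne]
    omega
  have hJ := (Jtake sep toks f hjoin j hj).1
  have hle := (Jtake sep toks f hjoin j hj).2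
  have hI := intercalate_take_flatten sep toks j h1 (by omega)
  rw [hjoin] at hI
  have hJI : f.take (pvSum toks sep.length j) = sep.intercalate (toks.take j) ++ sep := by
    rw [← hJ, flatten_all_right sep (toks.take j) htake]
  have hIlen : (sep.intercalate (toks.take j)).length = pvSum toks sep.length j - sep.length := by
    have := congrArg List.length hJI
    simp only [List.length_take, List.length_append] at this
    omega
  refine ⟨?_, ?_, hle⟩
  · rw [← hI, ← hIlen, List.drop_left]
  · have := congrArg List.length hJI
    simp only [List.length_take, List.length_append] at this
    omega

theorem validPrefix_iff (objectsu : List (List Char)) (f : List Char) (c : Nat)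
    (hc : c ≤ f.length) :
    ((objectsu.all (fun x => PySem.Chars.startswith x (f.take c))) = true) ↔
      c ≤ objectsu.foldl (fun acc o => min acc (pvCpl f o)) f.length := by
  rw [le_foldl_min (fun o => pvCpl f o) objectsu f.length c, List.all_eq_true]
  constructor
  · intro h
    refine ⟨hc, fun o ho => ?_⟩
    exact (cpl_iff f o c hc).mp ((PySem.Chars.startswith_iff o (f.take c)).mp (h o ho))
  · rintro ⟨-, h⟩ o ho
    exact (PySem.Chars.startswith_iff o (f.take c)).mpr ((cpl_iff f o c hc).mpr (h o ho))

theorem validPostfix_iff (objectsu : List (List Char)) (f : List Char) (q : Nat)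
    (hq : q ≤ f.length) :
    ((objectsu.all (fun o => PySem.Chars.endswith o (f.drop (f.length - q)))) = true) ↔
      q ≤ objectsu.foldl (fun acc o => min acc (pvCsl f o)) f.length := by
  rw [le_foldl_min (fun o => pvCsl f o) objectsu f.length q, List.all_eq_true]
  constructor
  · intro h
    refine ⟨hq, fun o ho => ?_⟩
    exact (csl_iff f o q hq).mp ((PySem.Chars.endswith_iff o _).mp (h o ho))
  · rintro ⟨-, h⟩ o ho
    exact (PySem.Chars.endswith_iff o _).mpr ((csl_iff f o q hq).mpr (h o ho))

theorem allPrefix_false (objectsu : List (List Char)) (f sep : List Char)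
    (hmem : f ∈ objectsu) (hsep : sep ≠ []) :
    (objectsu.all (fun x => PySem.Chars.startswith x (f ++ sep))) = false := by
  rw [List.all_eq_false]
  refine ⟨f, hmem, ?_⟩
  simp only [Bool.not_eq_true]
  rw [← Bool.not_eq_true, PySem.Chars.startswith_iff]
  intro hpre
  have := hpre.length_le
  simp at this
  exact hsep this

theorem allPostfix_false (objectsu : List (List Char)) (f sep : List Char)
    (hmem : f ∈ objectsu) (hsep : sep ≠ []) :
    (objectsu.all (fun o => PySem.Chars.endswith o (sep ++ f))) = false := by
  rw [List.all_eq_false]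
  refine ⟨f, hmem, ?_⟩
  simp only [Bool.not_eq_true]
  rw [← Bool.not_eq_true, PySem.Chars.endswith_iff]
  intro hsuf
  have := hsuf.length_le
  simp at this
  exact hsep this

-- ===== S7: bounds / monotone =====
theorem pvSum_ge_k (toks : List (List Char)) (k : Nat) (hk : 1 ≤ k) (hne : toks ≠ [])
    (m : Nat) (h1 : 1 ≤ m) (hm : m ≤ toks.length) : k ≤ pvSum toks k m := by
  match toks with
  | t :: ts =>
    have h0 : pvSum (t :: ts) k 1 = t.length + k := by simp [pvSum]
    have h2 := pvSum_le_of_le (t :: ts) k hk 1 m h1 hm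
    omega

theorem cuts_mono_after (toks : List (List Char)) (k : Nat) (hk : 1 ≤ k) (i : Nat) (x : Nat)
    (hi : i < (pvCuts toks k).length) (hx : x ∈ (pvCuts toks k).drop (i + 1)) :
    (pvCuts toks k)[i]'hi < x := by
  rw [List.mem_iff_getElem] at hx
  obtain ⟨j, hj, hje⟩ := hx
  rw [List.getElem_drop] at hje
  rw [List.length_drop] at hj
  have hilen : i < toks.length - 1 := by rw [cuts_length] at hi; exact hi
  have hj' : i + 1 + j < toks.length - 1 := by rw [cuts_length] at hj; omega
  rw [cuts_getElem toks k _ hj'] at hje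
  rw [cuts_getElem toks k i hilen]
  rw [← hje]
  exact pvSum_lt toks k hk (i + 1) (i + 1 + j + 1) (by omega) (by omega)

-- ===== S8: the A prefix loop computes B's n1 =====
theorem preloop (objectsu : List (List Char)) (f : List Char) (s : Char) (ss : List Char)
    (hmem : f ∈ objectsu)
    (toks : List (List Char)) (htoks : toks = PySem.Chars.splitOn f (s :: ss)) :
    ∀ (cs : List Nat) (i fuel prev : Nat),
      (pvCuts toks (ss.length + 1)).drop i = cs →
      i + 1 ≤ toks.length →
      toks.length - (i + 1) ≤ fuel →
      pvAPrefixGo objectsu toks (s :: ss) fuel (i + 1) (some (f.take prev)) =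
        some (f.take (PySem.List.maxD
          (cs.filter (fun c => c ≤ objectsu.foldl (fun acc o => min acc (pvCpl f o)) f.length))
          id prev)) := by
  have hjoin : (s :: ss).intercalate toks = f := htoks ▸ join_splitOn s ss f
  have hne : toks ≠ [] := htoks ▸ splitOn_ne_nil s ss f
  have hk : (s :: ss).length = ss.length + 1 := by simp
  intro cs
  induction cs with
  | nil =>
    intro i fuel prev hdrop hi hfuel
    have hilen : toks.length - 1 ≤ i := by
      have := List.drop_eq_nil_iff.mp hdrop
      rw [cuts_length] at this
      omega
    have hieq : i + 1 = toks.length := by omega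
    match fuel with
    | 0 => simp [pvAPrefixGo, maxD_nil]
    | fuel + 1 =>
      simp only [pvAPrefixGo]
      rw [Jfull (s :: ss) toks f hjoin hne (i + 1) (by omega),
        allPrefix_false objectsu f (s :: ss) hmem (by simp)]
      simp [maxD_nil]
  | cons c cs' ih =>
    intro i fuel prev hdrop hi hfuel
    have hine : (pvCuts toks (ss.length + 1)).drop i ≠ [] := by rw [hdrop]; simp
    have hilt : i < (pvCuts toks (ss.length + 1)).length := by
      rcases Nat.lt_or_ge i (pvCuts toks (ss.length + 1)).length with h | h
      · exact h
      · exact absurd (List.drop_eq_nil_of_le h) hine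
    have hilen : i < toks.length - 1 := by rw [cuts_length] at hilt; exact hilt
    have hsplit := List.getElem_cons_drop (as := pvCuts toks (ss.length + 1)) (i := i) hilt
    rw [hdrop] at hsplit
    obtain ⟨h1a, h2a⟩ := List.cons_eq_cons.mp hsplit
    have hc : c = pvSum toks (ss.length + 1) (i + 1) := by
      rw [← h1a, cuts_getElem toks (ss.length + 1) i hilen]
    have hcs' : (pvCuts toks (ss.length + 1)).drop (i + 1) = cs' := h2a
    match fuel with
    | 0 => omega
    | fuel + 1 =>
      simp only [pvAPrefixGo]
      have hJ := Jtake (s :: ss) toks f hjoin (i + 1) (by omega)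
      rw [hJ.1]
      simp only [List.length_cons]
      rw [← hc]
      have hclen : c ≤ f.length := by rw [hc]; exact hJ.2
      have hmono : ∀ x ∈ cs', c < x := by
        intro x hx
        rw [← hcs'] at hx
        have := cuts_mono_after toks (ss.length + 1) (by omega) i x hilt hx
        rw [cuts_getElem toks (ss.length + 1) i hilen] at this
        omega
      by_cases hcL : c ≤ objectsu.foldl (fun acc o => min acc (pvCpl f o)) f.length
      · rw [if_pos ((validPrefix_iff objectsu f c hclen).mpr hcL)]
        rw [ih (i + 1) fuel c hcs' (by omega) (by omega)]
        rw [List.filter_cons_of_pos (by simpa using hcL)]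
        rw [maxD_cons_mono c _ prev (fun x hx => hmono x (List.mem_of_mem_filter hx))]
      · rw [if_neg (by rw [(validPrefix_iff objectsu f c hclen)]; exact hcL)]
        rw [List.filter_cons_of_neg (by simpa using hcL)]
        have : cs'.filter (fun c => decide (c ≤ objectsu.foldl (fun acc o => min acc (pvCpl f o)) f.length)) = [] := by
          rw [List.filter_eq_nil_iff]
          intro x hx
          have := hmono x hx
          simp
          omega
        rw [this, maxD_nil]

theorem startswith_nil (x : List Char) : PySem.Chars.startswith x [] = true := by
  cases x <;> rfl

theorem endswith_nil (x : List Char) : PySem.Chars.endswith x [] = true := by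
  simp [PySem.Chars.endswith, List.isSuffixOf]

theorem prefix_result (objectsu : List (List Char)) (f : List Char) (s : Char) (ss : List Char)
    (hmem : f ∈ objectsu)
    (toks : List (List Char)) (htoks : toks = PySem.Chars.splitOn f (s :: ss))
    (ntokens : Nat) (hnt : toks.length ≤ ntokens) :
    pvAPrefixGo objectsu toks (s :: ss) ntokens 0 none =
      some (f.take (PySem.List.maxD
        ((pvCuts toks (ss.length + 1)).filter
          (fun c => c ≤ objectsu.foldl (fun acc o => min acc (pvCpl f o)) f.length))
        id 0)) := by
  have hne : toks ≠ [] := htoks ▸ splitOn_ne_nil s ss f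
  have hn1 : 1 ≤ toks.length := List.length_pos_of_ne_nil hne
  match ntokens with
  | 0 => omega
  | m + 1 =>
    simp only [pvAPrefixGo, List.take_zero, List.map_nil, List.flatten_nil]
    rw [List.all_eq_true.mpr (fun x _ => startswith_nil x), if_pos rfl]
    have h0 : (some ([] : List Char)) = some (f.take 0) := by simp
    rw [h0]
    exact preloop objectsu f s ss hmem toks htoks (pvCuts toks (ss.length + 1)) 0 m 0 rfl
      (by omega) (by omega)

-- ===== S9: the A postfix loop computes B's n2 =====
theorem ds_length (toks : List (List Char)) (k : Nat) (f : List Char) :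
    (((pvCuts toks k).reverse).map (fun c => f.length - (c - k))).length = toks.length - 1 := by
  simp [cuts_length]

theorem ds_getElem (toks : List (List Char)) (k : Nat) (f : List Char) (j : Nat)
    (hj : j < toks.length - 1) :
    ((((pvCuts toks k).reverse).map (fun c => f.length - (c - k)))[j]'(by rw [ds_length]; exact hj)) =
      f.length - (pvSum toks k (toks.length - 1 - j) - k) := by
  rw [List.getElem_map, List.getElem_reverse]
  have h1 : (pvCuts toks k).length - 1 - j < toks.length - 1 := by
    rw [cuts_length]; omega
  rw [cuts_getElem toks k _ h1, cuts_length]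
  have harg : toks.length - 1 - 1 - j + 1 = toks.length - 1 - j := by omega
  rw [harg]

theorem ds_mono_after (s : Char) (ss : List Char) (toks : List (List Char)) (f : List Char)
    (hjoin : (s :: ss).intercalate toks = f) (hne : toks ≠ [])
    (i x : Nat) (hi : i < toks.length - 1)
    (hx : x ∈ ((((pvCuts toks (ss.length + 1)).reverse).map
      (fun c => f.length - (c - (ss.length + 1)))).drop (i + 1))) :
    f.length - (pvSum toks (ss.length + 1) (toks.length - 1 - i) - (ss.length + 1)) < x := by
  rw [List.mem_iff_getElem] at hx
  obtain ⟨j, hj, hje⟩ := hx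
  rw [List.getElem_drop] at hje
  rw [List.length_drop, ds_length] at hj
  have hj2 : i + 1 + j < toks.length - 1 := by omega
  rw [ds_getElem toks (ss.length + 1) f (i + 1 + j) hj2] at hje
  have hk : (s :: ss).length = ss.length + 1 := by simp
  have ha : pvSum toks (ss.length + 1) (toks.length - 1 - i) ≤ f.length := by
    have := (Jtake (s :: ss) toks f hjoin (toks.length - 1 - i) (by omega)).2
    rw [hk] at this
    exact this
  have hb : (ss.length + 1) ≤ pvSum toks (ss.length + 1) (toks.length - 1 - (i + 1 + j)) :=
    pvSum_ge_k toks (ss.length + 1) (by omega) hne _ (by omega) (by omega)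
  have hba : pvSum toks (ss.length + 1) (toks.length - 1 - (i + 1 + j)) <
      pvSum toks (ss.length + 1) (toks.length - 1 - i) :=
    pvSum_lt toks (ss.length + 1) (by omega) _ _ (by omega) (by omega)
  omega

theorem postloop (objectsu : List (List Char)) (f : List Char) (s : Char) (ss : List Char)
    (hmem : f ∈ objectsu)
    (toks : List (List Char)) (htoks : toks = PySem.Chars.splitOn f (s :: ss)) :
    ∀ (es : List Nat) (i fuel prev : Nat),
      ((((pvCuts toks (ss.length + 1)).reverse).map
        (fun c => f.length - (c - (ss.length + 1)))).drop i) = es →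
      i + 1 ≤ toks.length →
      toks.length - (i + 1) ≤ fuel →
      prev ≤ f.length →
      pvAPostfixGo objectsu toks (s :: ss) fuel (i + 1) (some (f.drop (f.length - prev))) =
        some (f.drop (f.length - PySem.List.maxD
          (es.filter (fun d => d ≤ objectsu.foldl (fun acc o => min acc (pvCsl f o)) f.length))
          id prev)) := by
  have hjoin : (s :: ss).intercalate toks = f := htoks ▸ join_splitOn s ss f
  have hne : toks ≠ [] := htoks ▸ splitOn_ne_nil s ss f
  intro es
  induction es with
  | nil =>
    intro i fuel prev hdrop hi hfuel hprev
    have hilen : toks.length - 1 ≤ i := by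
      have := List.drop_eq_nil_iff.mp hdrop
      rw [ds_length] at this
      omega
    have hieq : i + 1 = toks.length := by omega
    match fuel with
    | 0 => simp [pvAPostfixGo, maxD_nil]
    | fuel + 1 =>
      simp only [pvAPostfixGo]
      have hcast : (toks.length : Int) - ((i + 1 : Nat) : Int) = ((0 : Nat) : Int) := by
        push_cast; omega
      rw [hcast, PySem.List.slice_from_natCast]
      rw [List.drop_zero, flatten_all_left (s :: ss) toks hne, hjoin,
        allPostfix_false objectsu f (s :: ss) hmem (by simp)]
      simp [maxD_nil]
  | cons d es' ih =>
    intro i fuel prev hdrop hi hfuel hprev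
    have hine : ((((pvCuts toks (ss.length + 1)).reverse).map
        (fun c => f.length - (c - (ss.length + 1)))).drop i) ≠ [] := by rw [hdrop]; simp
    have hilt : i < (((pvCuts toks (ss.length + 1)).reverse).map
        (fun c => f.length - (c - (ss.length + 1)))).length := by
      rcases Nat.lt_or_ge i _ with h | h
      · exact h
      · exact absurd (List.drop_eq_nil_of_le h) hine
    have hilen : i < toks.length - 1 := by rw [ds_length] at hilt; exact hilt
    have hsplit := List.getElem_cons_drop
      (as := (((pvCuts toks (ss.length + 1)).reverse).map
        (fun c => f.length - (c - (ss.length + 1))))) (i := i) hilt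
    rw [hdrop] at hsplit
    obtain ⟨h1a, h2a⟩ := List.cons_eq_cons.mp hsplit
    have hd : d = f.length - (pvSum toks (ss.length + 1) (toks.length - 1 - i) - (ss.length + 1)) := by
      rw [← h1a, ds_getElem toks (ss.length + 1) f i hilen]
    match fuel with
    | 0 => omega
    | fuel + 1 =>
      simp only [pvAPostfixGo]
      have hcast : (toks.length : Int) - ((i + 1 : Nat) : Int) =
          ((toks.length - (i + 1) : Nat) : Int) := by
        push_cast; omega
      rw [hcast, PySem.List.slice_from_natCast]
      have harg : toks.length - (i + 1) = toks.length - 1 - i := by omega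
      rw [harg]
      have hW := Wdrop (s :: ss) toks f hjoin (toks.length - 1 - i) (by omega) (by omega)
      simp only [List.length_cons] at hW
      rw [hW.1]
      have hq : pvSum toks (ss.length + 1) (toks.length - 1 - i) - (ss.length + 1) = f.length - d := by
        omega
      rw [hq]
      have hdlen : d ≤ f.length := by omega
      have hmono : ∀ x ∈ es', d < x := by
        intro x hx
        rw [← h2a] at hx
        rw [hd]
        exact ds_mono_after s ss toks f hjoin hne i x hilen hx
      by_cases hdR : d ≤ objectsu.foldl (fun acc o => min acc (pvCsl f o)) f.length
      · rw [if_pos ((validPostfix_iff objectsu f d hdlen).mpr hdR)]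
        rw [ih (i + 1) fuel d h2a (by omega) (by omega) hdlen]
        rw [List.filter_cons_of_pos (by simpa using hdR)]
        rw [maxD_cons_mono d _ prev (fun x hx => hmono x (List.mem_of_mem_filter hx))]
      · rw [if_neg (by rw [(validPostfix_iff objectsu f d hdlen)]; exact hdR)]
        rw [List.filter_cons_of_neg (by simpa using hdR)]
        have : es'.filter (fun d => decide (d ≤ objectsu.foldl (fun acc o => min acc (pvCsl f o)) f.length)) = [] := by
          rw [List.filter_eq_nil_iff]
          intro x hx
          have := hmono x hx
          simp
          omega
        rw [this, maxD_nil]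

theorem postfix_result (objectsu : List (List Char)) (f : List Char) (s : Char) (ss : List Char)
    (hmem : f ∈ objectsu)
    (toks : List (List Char)) (htoks : toks = PySem.Chars.splitOn f (s :: ss))
    (ntokens : Nat) (hnt : toks.length ≤ ntokens) :
    pvAPostfixGo objectsu toks (s :: ss) ntokens 0 none =
      some (f.drop (f.length - PySem.List.maxD
        ((((pvCuts toks (ss.length + 1)).reverse).map
          (fun c => f.length - (c - (ss.length + 1)))).filter
          (fun d => d ≤ objectsu.foldl (fun acc o => min acc (pvCsl f o)) f.length))
        id 0)) := by
  have hne : toks ≠ [] := htoks ▸ splitOn_ne_nil s ss f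
  have hn1 : 1 ≤ toks.length := List.length_pos_of_ne_nil hne
  match ntokens with
  | 0 => omega
  | m + 1 =>
    simp only [pvAPostfixGo]
    have hcast : (toks.length : Int) - ((0 : Nat) : Int) = ((toks.length : Nat) : Int) := by
      push_cast; omega
    rw [hcast, PySem.List.slice_from_natCast, List.drop_length]
    simp only [List.map_nil, List.flatten_nil]
    rw [List.all_eq_true.mpr (fun x _ => endswith_nil x), if_pos rfl]
    have h0 : (some ([] : List Char)) = some (f.drop (f.length - 0)) := by simp
    rw [h0]
    exact postloop objectsu f s ss hmem toks htoks _ 0 m 0 rfl (by omega) (by omega) (by omega)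


-- ===== bridge: the declarative Pre_ lengths are B's n1/n2 =====
theorem cuts_mem_le (s : Char) (ss : List Char) (f : List Char) :
    ∀ c ∈ pvCuts (PySem.Chars.splitOn f (s :: ss)) (ss.length + 1), c ≤ f.length := by
  intro c hc
  obtain ⟨j, hj, rfl⟩ := List.mem_iff_getElem.mp hc
  have hj' : j < (PySem.Chars.splitOn f (s :: ss)).length - 1 := by
    rw [cuts_length] at hj; exact hj
  rw [cuts_getElem _ _ j hj']
  exact (Jtake (s :: ss) _ f (join_splitOn s ss f) (j + 1) (by omega)).2

theorem bpl_eq (objectsu : List (List Char)) (f : List Char) (s : Char) (ss : List Char) :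
    pvBoundaryPrefixLen f (s :: ss) objectsu =
      PySem.List.maxD
        ((pvCuts (PySem.Chars.splitOn f (s :: ss)) (ss.length + 1)).filter
          (fun c => decide (c ≤ objectsu.foldl (fun acc o => min acc (pvCpl f o)) f.length))) id 0 := by
  unfold pvBoundaryPrefixLen
  simp only [List.length_cons]
  congr 1
  apply List.filter_congr
  intro c hc
  have hcle : c ≤ f.length := cuts_mem_le s ss f c hc
  by_cases h : c ≤ objectsu.foldl (fun acc o => min acc (pvCpl f o)) f.length
  · rw [decide_eq_true h]
    exact (validPrefix_iff objectsu f c hcle).mpr h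
  · rw [decide_eq_false h]
    cases hall : (objectsu.all fun o => (f.take c).isPrefixOf o)
    · rfl
    · exact absurd ((validPrefix_iff objectsu f c hcle).mp hall) h

theorem bsl_eq (objectsu : List (List Char)) (f : List Char) (s : Char) (ss : List Char) :
    pvBoundarySuffixLen f (s :: ss) objectsu =
      PySem.List.maxD
        (((((pvCuts (PySem.Chars.splitOn f (s :: ss)) (ss.length + 1)).reverse).map
            (fun c => f.length - (c - (ss.length + 1)))).filter
          (fun d => decide (d ≤ objectsu.foldl (fun acc o => min acc (pvCsl f o)) f.length)))) id 0 := by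
  unfold pvBoundarySuffixLen
  simp only [List.length_cons]
  congr 1
  apply List.filter_congr
  intro d hd
  have hdle : d ≤ f.length := by
    obtain ⟨c, hc, rfl⟩ := List.mem_map.mp hd
    omega
  by_cases h : d ≤ objectsu.foldl (fun acc o => min acc (pvCsl f o)) f.length
  · rw [decide_eq_true h]
    exact (validPostfix_iff objectsu f d hdle).mpr h
  · rw [decide_eq_false h]
    cases hall : (objectsu.all fun o => (f.drop (f.length - d)).isSuffixOf o)
    · rfl
    · exact absurd ((validPostfix_iff objectsu f d hdle).mp hall) h

-- ===== S10: small assembly lemmas =====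
theorem maxD_filter_le (l : List Nat) (L : Nat) :
    PySem.List.maxD (l.filter (fun c => c ≤ L)) id 0 ≤ L := by
  rcases maxD_mem_or (l.filter (fun c => decide (c ≤ L))) 0 with h | h
  · rw [h]; omega
  · have := List.of_mem_filter h
    simpa using this

theorem foldl_min_le_init {α : Type} (g : α → Nat) (l : List α) (a : Nat) :
    l.foldl (fun acc x => min acc (g x)) a ≤ a :=
  ((le_foldl_min g l a _).mp le_rfl).1

theorem foldl_min_le_mem {α : Type} (g : α → Nat) (l : List α) (a : Nat) (x : α) (hx : x ∈ l) :
    l.foldl (fun acc x => min acc (g x)) a ≤ g x :=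
  ((le_foldl_min g l a _).mp le_rfl).2 x hx

theorem max?_getD_ge (x : Nat) (xs : List Nat) (y : Nat) (hy : y ∈ x :: xs) :
    y ≤ (PySem.List.max? (x :: xs) id).getD 0 := by
  obtain ⟨r, hr⟩ := pvFoldMax_some xs x
  have hm : PySem.List.max? (x :: xs) id = some r := by
    rw [max?_eq_foldl_pvStep, List.foldl_cons]
    exact hr
  rw [hm]
  exact PySem.List.max?_isMax hm y hy

theorem recompose (f o : List Char) (n1 n2 : Nat) (h1 : n1 ≤ pvCpl f o) (h2 : n2 ≤ pvCsl f o)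
    (hb : n1 + n2 ≤ o.length) :
    f.take n1 ++ PySem.List.slice o (some (n1 : Int)) (some ((o.length : Int) - (n2 : Int))) ++
      f.drop (f.length - n2) = o := by
  have ht : f.take n1 = o.take n1 := cpl_take f o n1 h1
  have hd : f.drop (f.length - n2) = o.drop (o.length - n2) := csl_drop f o n2 h2
  have hcast : ((o.length : Int) - (n2 : Int)) = ((o.length - n2 : Nat) : Int) := by
    push_cast; omega
  rw [ht, hd, hcast, PySem.List.slice_natCast, List.append_assoc]
  conv_rhs => rw [← List.take_append_drop n1 o]
  congr 1
  have hdd : o.drop (o.length - n2) = (o.drop n1).drop (o.length - n2 - n1) := by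
    rw [List.drop_drop]
    congr 1
    omega
  rw [hdd, List.take_append_drop]

-- ===== VERDICT (by name: the statement is the Claim_ definition above) =====
theorem minimal_names_at_boundaries_spec : Claim_equal_minimal_names_at_boundaries := by
  unfold Claim_equal_minimal_names_at_boundaries
  intro objects separators hdom hpre
  unfold Spec_minimal_names_at_boundaries
  by_cases h1 : objects.length = 1
  · simp [minimal_names_at_boundaries, minimal_names_at_boundaries_alt, h1]
  · rcases hpre with h | ⟨hone, htwo, hsepne, hbound⟩
    · exact absurd h h1
    obtain ⟨o0, rest, rfl⟩ := List.exists_cons_of_ne_nil hone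
    obtain ⟨s0s, seps', rfl⟩ := List.exists_cons_of_ne_nil htwo
    simp only [List.headD_cons] at hsepne hbound
    obtain ⟨s, ss, hs0⟩ : ∃ s ss, s0s.toList = s :: ss := by
      match h : s0s.toList with
      | [] => exact absurd h hsepne
      | c :: cs => exact ⟨c, cs, rfl⟩
    rw [minimal_names_at_boundaries, minimal_names_at_boundaries_alt]
    rw [if_neg h1, if_neg h1]
    simp only [hs0, reduceCtorEq, if_false, List.map_cons, List.headD_cons]
    have hmem : o0.toList ∈ o0.toList :: rest.map String.toList := List.mem_cons_self
    have hnt := max?_getD_ge ((PySem.Chars.splitOn o0.toList (s :: ss)).length)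
        (((rest.map String.toList)).map (fun x => PySem.Chars.splitOn x (s :: ss)) |>.map List.length)
        ((PySem.Chars.splitOn o0.toList (s :: ss)).length) List.mem_cons_self
    rw [prefix_result (o0.toList :: rest.map String.toList) o0.toList s ss hmem
          (PySem.Chars.splitOn o0.toList (s :: ss)) rfl _ hnt,
        postfix_result (o0.toList :: rest.map String.toList) o0.toList s ss hmem
          (PySem.Chars.splitOn o0.toList (s :: ss)) rfl _ hnt,
        Option.getD_some, Option.getD_some]
    rw [hs0] at hbound
    simp only [List.map_cons] at hbound
    rw [bpl_eq (o0.toList :: rest.map String.toList) o0.toList s ss,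
      bsl_eq (o0.toList :: rest.map String.toList) o0.toList s ss] at hbound
    simp only [pvTrimLens, List.length_cons, List.map_cons]
    set f := o0.toList with hfdef
    set restu := rest.map String.toList with hrest
    set L := List.foldl (fun acc o => min acc (pvCpl f o)) f.length (f :: restu) with hL
    set R := List.foldl (fun acc o => min acc (pvCsl f o)) f.length (f :: restu) with hR
    set cuts := pvCuts (PySem.Chars.splitOn f (s :: ss)) (ss.length + 1) with hcuts
    set n1 := PySem.List.maxD (List.filter (fun c => decide (c ≤ L)) cuts) id 0 with hn1
    set n2 := PySem.List.maxD
        (List.filter (fun d => decide (d ≤ R))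
          (List.map (fun c => f.length - (c - (ss.length + 1))) cuts.reverse)) id 0 with hn2
    have hLf : L ≤ f.length := foldl_min_le_init (fun o => pvCpl f o) (f :: restu) f.length
    have hRf : R ≤ f.length := foldl_min_le_init (fun o => pvCsl f o) (f :: restu) f.length
    have hn1L : n1 ≤ L := maxD_filter_le cuts L
    have hn2R : n2 ≤ R := maxD_filter_le _ R
    have hn1f : n1 ≤ f.length := le_trans hn1L hLf
    have hn2f : n2 ≤ f.length := le_trans hn2R hRf
    rw [List.length_take, Nat.min_eq_left hn1f, List.length_drop]
    rw [show f.length - (f.length - n2) = n2 from by omega]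
    have hFall : ∀ o ∈ f :: restu,
        List.take n1 f ++ PySem.List.slice o (some (n1 : Int)) (some ((o.length : Int) - (n2 : Int))) ++
          List.drop (f.length - n2) f = o := by
      intro o ho
      have hcplo : n1 ≤ pvCpl f o :=
        le_trans hn1L (foldl_min_le_mem (fun o => pvCpl f o) (f :: restu) f.length o ho)
      have hcslo : n2 ≤ pvCsl f o :=
        le_trans hn2R (foldl_min_le_mem (fun o => pvCsl f o) (f :: restu) f.length o ho)
      have hb : n1 + n2 ≤ o.length := by
        have hex : ∃ x ∈ o0 :: rest, x.toList = o := by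
          rcases List.mem_cons.mp ho with rfl | ho2
          · exact ⟨o0, by simp, hfdef.symm⟩
          · rw [hrest, List.mem_map] at ho2
            obtain ⟨x, hx, hxo⟩ := ho2
            exact ⟨x, List.mem_cons_of_mem _ hx, hxo⟩
        obtain ⟨x, hx, rfl⟩ := hex
        exact hbound x hx
      exact recompose f o n1 n2 hcplo hcslo hb
    have hcond : f :: restu =
        (List.take n1 f ++ PySem.List.slice f (some (n1 : Int)) (some ((f.length : Int) - (n2 : Int))) ++
            List.drop (f.length - n2) f) ::
          List.map (fun m => List.take n1 f ++ m ++ List.drop (f.length - n2) f)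
            (List.map (fun o => PySem.List.slice o (some (n1 : Int)) (some ((o.length : Int) - (n2 : Int)))) restu) := by
      rw [List.map_map]
      refine List.cons_eq_cons.mpr ⟨(hFall f hmem).symm, ?_⟩
      symm
      have hmc := List.map_congr_left (l := restu) (g := id)
        (f := ((fun m => List.take n1 f ++ m ++ List.drop (f.length - n2) f) ∘
          (fun o => PySem.List.slice o (some (n1 : Int)) (some ((o.length : Int) - (n2 : Int))))))
        (fun o ho => hFall o (List.mem_cons_of_mem _ ho))
      rw [hmc, List.map_id]
    rw [if_pos hcond]
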